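-- pv_equiv track=rewrite | github.com/Maxilyas/pathforge_ascension | pathforge/balance/bot.py | compute_killzone
-- ===== SOURCE A (Python) =====
-- from typing import List, Tuple, Dict, Any
--
-- Coord = Tuple[int, int]
--
-- def compute_killzone(path: List[Coord]) -> Coord:
--     """Pick a 'killzone' along the path: a dense segment where towers can cover many tiles."""
--     if not path:
--         return (0, 0)
--     best = path[len(path)//2]
--     best_score = -1
--     path_set = set(path)
--     for (x, y) in path:
--         # density within diamond radius 3
--         d = 0
--         for dx in range(-3, 4):
--             for dy in range(-3, 4):
--                 if abs(dx) + abs(dy) > 3: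
--                     continue
--                 if (x + dx, y + dy) in path_set:
--                     d += 1
--         if d > best_score:
--             best_score = d
--             best = (x, y)
--     return best
-- ===== SOURCE B (Python) =====
-- # Scatter pass: build a density map once from the distinct path cells, then one ordered scan.
-- _OFFSETS = [(dx, dy) for dx in range(-3, 4) for dy in range(-3, 4) if abs(dx) + abs(dy) <= 3]
--
-- def compute_killzone(path):
--     density = {}
--     for (x, y) in set(path):
--         for (dx, dy) in _OFFSETS:
--             key = (x + dx, y + dy)
--             density[key] = density.get(key, 0) + 1
--     best, best_score = (0, 0), -1
--     for p in path:
--         d = density.get(p, 0)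
--         if d > best_score:
--             best, best_score = p, d
--     return best
-- ===== Notes on version B (the rewrite author's own statement) =====
-- stated objective: alternative
-- what changed: Instead of re-counting the 25-offset diamond around every path point (gather), B scatters +1 from each distinct cell into a density dict once, then a single ordered pass picks the first strict maximum; the per-point nested offset loops disappear.
import Mathlib
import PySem

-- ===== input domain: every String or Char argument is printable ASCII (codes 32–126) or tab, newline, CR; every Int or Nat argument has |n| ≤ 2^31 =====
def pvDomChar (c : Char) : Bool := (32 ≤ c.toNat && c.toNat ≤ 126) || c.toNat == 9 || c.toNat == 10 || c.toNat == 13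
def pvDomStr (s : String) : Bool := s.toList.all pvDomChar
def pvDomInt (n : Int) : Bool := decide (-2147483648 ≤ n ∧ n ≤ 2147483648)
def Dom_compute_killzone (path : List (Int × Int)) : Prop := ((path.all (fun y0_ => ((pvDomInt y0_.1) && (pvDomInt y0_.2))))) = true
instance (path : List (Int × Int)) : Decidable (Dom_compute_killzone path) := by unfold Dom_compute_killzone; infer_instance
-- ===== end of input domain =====

-- B replaces A's per-point gather over the diamond offsets by a one-shot scatter into a
-- density dict built from the distinct path cells, then one ordered scan (alternative
-- decomposition, same asymptotic cost).


-- ===== PORT A =====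
-- inner density count for (x, y): the two nested 'for dx/dy in range(-3, 4)' loops
def czScoreA (pathSet : PySem.Set (Int × Int)) (x y : Int) : Int :=
  (PySem.List.pyRange (-3) 4 1).foldl (fun d dx =>
    (PySem.List.pyRange (-3) 4 1).foldl (fun d dy =>
      if 3 < |dx| + |dy| then d
      else if PySem.Set.contains pathSet (x + dx, y + dy) then d + 1 else d) d) 0

def compute_killzone (path : List (Int × Int)) : Int × Int :=
  if path = [] then (0, 0)
  else
    -- path[len(path)//2]: pyGetD is exact here since 0 ≤ len//2 < len on a nonempty list
    let best : Int × Int := PySem.List.pyGetD path (PySem.Int.floordiv (path.length : Int) 2) (0, 0)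
    let pathSet : PySem.Set (Int × Int) := PySem.Set.ofList path
    (path.foldl (fun (st : (Int × Int) × Int) p =>
        let d := czScoreA pathSet p.1 p.2
        if d > st.2 then (p, d) else st) (best, -1)).1

-- ===== PORT B =====
-- _OFFSETS = [(dx, dy) for dx in range(-3, 4) for dy in range(-3, 4) if abs(dx)+abs(dy) <= 3]
def czOffsets : List (Int × Int) :=
  (PySem.List.pyRange (-3) 4 1).flatMap (fun dx =>
    ((PySem.List.pyRange (-3) 4 1).filter (fun dy => decide (|dx| + |dy| ≤ 3))).map
      (fun dy => (dx, dy)))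

def compute_killzone_alt (path : List (Int × Int)) : Int × Int :=
  let density : PySem.Dict (Int × Int) Int :=
    (PySem.Set.ofList path).foldl (fun d c =>
      czOffsets.foldl (fun d o =>
        d.insert (c.1 + o.1, c.2 + o.2) (d.getD (c.1 + o.1, c.2 + o.2) 0 + 1)) d)
      PySem.Dict.empty
  (path.foldl (fun (st : (Int × Int) × Int) p =>
      let d := density.getD p 0
      if d > st.2 then (p, d) else st) ((0, 0), -1)).1

-- ===== PRECONDITION & SPEC =====
def Spec_compute_killzone (path : List (Int × Int)) (out : Int × Int) : Prop := out = compute_killzone_alt path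
instance (path : List (Int × Int)) (out : Int × Int) : Decidable (Spec_compute_killzone path out) := by unfold Spec_compute_killzone; infer_instance

-- ===== CLAIM (what is proved, stated in full; the proofs are below) =====
def Claim_equal_compute_killzone : Prop := ∀ (path : List (Int × Int)), Dom_compute_killzone path → Spec_compute_killzone path (compute_killzone path)

-- ===== LEMMAS AND PROOFS =====

lemma nodup_czOffsets : czOffsets.Nodup := by decide

-- characterisation of the offset diamond
lemma mem_czOffsets (a b : Int) :
    (a, b) ∈ czOffsets ↔ -3 ≤ a ∧ a < 4 ∧ -3 ≤ b ∧ b < 4 ∧ |a| + |b| ≤ 3 := by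
  unfold czOffsets
  simp only [List.mem_flatMap, List.mem_filter, List.mem_map, PySem.List.mem_pyRange_one,
    decide_eq_true_eq, Prod.mk.injEq]
  constructor
  · rintro ⟨dx, ⟨h1, h2⟩, dy, ⟨⟨h3, h4⟩, h5⟩, h6, h7⟩
    subst h6; subst h7; exact ⟨h1, h2, h3, h4, h5⟩
  · rintro ⟨h1, h2, h3, h4, h5⟩
    exact ⟨a, ⟨h1, h2⟩, b, ⟨⟨h3, h4⟩, h5⟩, rfl, rfl⟩

lemma contains_eq_decide (S : PySem.Set (Int × Int)) (z : Int × Int) :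
    S.contains z = decide (z ∈ S) := by
  by_cases h : z ∈ S <;> simp [h]

-- A's gather count is a countP over czOffsets
lemma scoreA_eq_countP (S : PySem.Set (Int × Int)) (x y : Int) :
    czScoreA S x y =
      ((czOffsets.countP (fun o => decide ((x + o.1, y + o.2) ∈ S))) : Int) := by
  unfold czScoreA czOffsets
  rw [PySem.List.foldl_congr_mem _ _
    (fun (d dx : Int) => d + ((List.countP
      (fun dy => decide ((x + dx, y + dy) ∈ S) && decide (|dx| + |dy| ≤ 3))
      (PySem.List.pyRange (-3) 4 1) : Nat) : Int)) 0
    (by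
      intro acc dx _
      have hinner :
          (fun (d : Int) (dy : Int) =>
            if 3 < |dx| + |dy| then d
            else if PySem.Set.contains S (x + dx, y + dy) then d + 1 else d)
          = (fun d dy =>
            if (decide ((x + dx, y + dy) ∈ S) && decide (|dx| + |dy| ≤ 3)) then d + 1 else d) := by
        funext d dy
        rw [contains_eq_decide]
        by_cases h1 : 3 < |dx| + |dy| <;> by_cases h2 : (x + dx, y + dy) ∈ S <;>
          simp [h1, h2]
      rw [hinner, PySem.List.foldl_count_if])]
  rw [PySem.List.foldl_add]
  rw [List.countP_flatMap]
  simp only [Function.comp_def, List.countP_map, List.countP_filter]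
  rw [Nat.cast_list_sum, List.map_map]
  simp [Function.comp_def, Bool.and_comm]

-- B's scatter loop, with an arbitrary starting dict
lemma density_general (S : List (Int × Int)) (d : PySem.Dict (Int × Int) Int) (v : Int × Int) :
    (S.foldl (fun d c =>
        czOffsets.foldl (fun d o =>
          d.insert (c.1 + o.1, c.2 + o.2) (d.getD (c.1 + o.1, c.2 + o.2) 0 + 1)) d) d).getD v 0 =
      d.getD v 0 +
        (S.map (fun c => (((czOffsets.map (fun o => (c.1 + o.1, c.2 + o.2))).count v : Nat) : Int))).sum := by
  induction S generalizing d with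
  | nil => simp
  | cons c S ih =>
    simp only [List.foldl_cons, List.map_cons, List.sum_cons, ih]
    have hm := List.foldl_map (f := fun o : Int × Int => (c.1 + o.1, c.2 + o.2))
        (g := fun (d : PySem.Dict (Int × Int) Int) k => d.insert k (d.getD k 0 + 1))
        (l := czOffsets) (init := d)
    rw [← hm, PySem.Dict.getD_foldl_insert_add_one]
    ring

-- each distinct cell contributes 0 or 1 to a given target
lemma count_map_key (c v : Int × Int) :
    (czOffsets.map (fun o => (c.1 + o.1, c.2 + o.2))).count v =
      if (v.1 - c.1, v.2 - c.2) ∈ czOffsets then 1 else 0 := by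
  rw [List.count_eq_countP, List.countP_map]
  have heq : ((fun x => x == v) ∘ fun o : Int × Int => (c.1 + o.1, c.2 + o.2))
       = (fun o => o == (v.1 - c.1, v.2 - c.2)) := by
    funext o
    rw [Function.comp_def, Bool.eq_iff_iff]
    simp only [beq_iff_eq, Prod.ext_iff]
    constructor <;> intro h <;> exact ⟨by omega, by omega⟩
  rw [heq, ← List.count_eq_countP]
  by_cases h : (v.1 - c.1, v.2 - c.2) ∈ czOffsets
  · simp [h, List.count_eq_one_of_mem nodup_czOffsets h]
  · simp [h, List.count_eq_zero_of_not_mem h]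

-- B's scatter lookup is a countP over S
lemma densityB_eq_countP (S : List (Int × Int)) (v : Int × Int) :
    (S.foldl (fun d c =>
        czOffsets.foldl (fun d o =>
          d.insert (c.1 + o.1, c.2 + o.2) (d.getD (c.1 + o.1, c.2 + o.2) 0 + 1)) d)
        PySem.Dict.empty).getD v 0 =
      ((S.countP (fun c => decide ((v.1 - c.1, v.2 - c.2) ∈ czOffsets))) : Int) := by
  rw [density_general]
  simp only [count_map_key, PySem.Dict.getD_empty]
  rw [show (fun c : Int × Int => ((if (v.1 - c.1, v.2 - c.2) ∈ czOffsets then 1 else 0 : Nat) : Int))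
        = (fun c : Int × Int => if decide ((v.1 - c.1, v.2 - c.2) ∈ czOffsets) then (1:Int) else 0) from by
    funext c; by_cases h : (v.1 - c.1, v.2 - c.2) ∈ czOffsets <;> simp [h]]
  rw [PySem.List.sum_map_ite_one_zero]
  ring

-- gather = scatter: the bijection o ↦ (x + o.1, y + o.2), using symmetry of the diamond
lemma countP_eq (S : List (Int × Int)) (hS : S.Nodup) (x y : Int) :
    czOffsets.countP (fun o => decide ((x + o.1, y + o.2) ∈ S)) =
      S.countP (fun c => decide ((x - c.1, y - c.2) ∈ czOffsets)) := by
  rw [List.countP_eq_length_filter, List.countP_eq_length_filter]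
  have hinj : Function.Injective (fun o : Int × Int => (x + o.1, y + o.2)) := by
    intro a b h
    simp only [Prod.ext_iff] at h ⊢
    constructor <;> omega
  have h1 : ((czOffsets.filter (fun o => decide ((x + o.1, y + o.2) ∈ S))).map
      (fun o => (x + o.1, y + o.2))).Nodup :=
    (List.Nodup.filter _ nodup_czOffsets).map hinj
  have h2 : (S.filter (fun c => decide ((x - c.1, y - c.2) ∈ czOffsets))).Nodup :=
    List.Nodup.filter _ hS
  have hmem : ∀ z, z ∈ (czOffsets.filter (fun o => decide ((x + o.1, y + o.2) ∈ S))).map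
      (fun o => (x + o.1, y + o.2)) ↔
      z ∈ S.filter (fun c => decide ((x - c.1, y - c.2) ∈ czOffsets)) := by
    intro z
    simp only [List.mem_map, List.mem_filter, decide_eq_true_eq]
    constructor
    · rintro ⟨⟨o1, o2⟩, ⟨ho, hzS⟩, rfl⟩
      refine ⟨hzS, ?_⟩
      have e1 : x - (x + o1) = -o1 := by ring
      have e2 : y - (y + o2) = -o2 := by ring
      rw [e1, e2]
      rw [mem_czOffsets] at ho ⊢
      simp only [abs_neg]
      omega
    · rintro ⟨hzS, hzo⟩
      refine ⟨(z.1 - x, z.2 - y), ⟨?_, ?_⟩, ?_⟩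
      · rw [mem_czOffsets] at hzo ⊢
        rw [abs_sub_comm z.1 x, abs_sub_comm z.2 y]
        omega
      · have h3 : (x + (z.1 - x), y + (z.2 - y)) = z := by simp
        rwa [h3]
      · simp
  have hperm := (List.perm_ext_iff_of_nodup h1 h2).mpr hmem
  have := hperm.length_eq
  simpa using this

-- the first path point always wins against the sentinel score -1, so A's midpoint seed
-- and B's (0, 0) seed both disappear after one step
lemma sel_loop (scA scB : Int × Int → Int) (hsc : ∀ p, scA p = scB p)
    (p0 : Int × Int) (rest : List (Int × Int)) (b1 b2 : Int × Int) (h0 : 0 ≤ scA p0) :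
    ((p0 :: rest).foldl (fun (st : (Int × Int) × Int) p =>
        let d := scA p; if d > st.2 then (p, d) else st) (b1, -1)).1 =
    ((p0 :: rest).foldl (fun (st : (Int × Int) × Int) p =>
        let d := scB p; if d > st.2 then (p, d) else st) (b2, -1)).1 := by
  have hf : (fun (st : (Int × Int) × Int) p =>
        let d := scA p; if d > st.2 then (p, d) else st)
      = (fun (st : (Int × Int) × Int) p =>
        let d := scB p; if d > st.2 then (p, d) else st) := by
    funext st p; simp only [hsc]
  rw [hf]
  simp only [List.foldl_cons]
  rw [if_pos (by rw [← hsc p0]; omega), if_pos (by rw [← hsc p0]; omega)]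

-- ===== VERDICT (by name: the statement is the Claim_ definition above) =====
theorem compute_killzone_spec : Claim_equal_compute_killzone := by
  intro path _
  unfold Spec_compute_killzone compute_killzone compute_killzone_alt
  cases path with
  | nil => simp
  | cons p0 rest =>
    simp only [reduceCtorEq, if_false]
    have hscore : ∀ p : Int × Int,
        czScoreA (PySem.Set.ofList (p0 :: rest)) p.1 p.2 =
          ((PySem.Set.ofList (p0 :: rest)).foldl (fun d c =>
            czOffsets.foldl (fun d o =>
              d.insert (c.1 + o.1, c.2 + o.2) (d.getD (c.1 + o.1, c.2 + o.2) 0 + 1)) d)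
            PySem.Dict.empty).getD p 0 := by
      intro p
      rw [scoreA_eq_countP, densityB_eq_countP,
        countP_eq _ (PySem.Set.nodup_ofList (p0 :: rest)) p.1 p.2]
    exact sel_loop _ _ hscore p0 rest _ _
      (by rw [scoreA_eq_countP]; exact Int.natCast_nonneg _)
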